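-- pv_equiv track=rewrite | github.com/Lokesh-Thakunna/ATS_SYSTEM | backend/ats_backend/matching/services.py | _is_title_variant
-- ===== SOURCE A (Python) =====
-- def _is_title_variant(job_title: str, candidate_title: str) -> bool:
--     """Check if titles are variants of each other"""
--     variants = {
--         'software engineer': ['software developer', 'software engineer', 'full stack developer'],
--         'product manager': ['product manager', 'product owner', 'product lead'],
--         'data scientist': ['data scientist', 'data analyst', 'machine learning engineer']
--     }
--
--     for canonical, variant_list in variants.items():
--         if job_title in variant_list and candidate_title in variant_list:
--             return True
--     return False
-- ===== SOURCE B (Python) =====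
-- _VARIANTS = {
--     'software engineer': ['software developer', 'software engineer', 'full stack developer'],
--     'product manager': ['product manager', 'product owner', 'product lead'],
--     'data scientist': ['data scientist', 'data analyst', 'machine learning engineer']
-- }
--
-- # Inverted index: each title string -> canonical key of its group (built once).
-- _INDEX = {title: canonical for canonical, titles in _VARIANTS.items() for title in titles}
--
--
-- def _is_title_variant(job_title: str, candidate_title: str) -> bool:
--     """Check if titles are variants of each other"""
--     return (job_title in _INDEX and candidate_title in _INDEX
--             and _INDEX[job_title] == _INDEX[candidate_title])
-- ===== Notes on version B (the rewrite author's own statement) =====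
-- stated objective: idiomatic
-- what changed: Replaces the loop over variant groups with double membership tests by a flat inverted index (title -> canonical group key) built once, so the function is two dictionary lookups and an equality comparison.
import Mathlib
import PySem

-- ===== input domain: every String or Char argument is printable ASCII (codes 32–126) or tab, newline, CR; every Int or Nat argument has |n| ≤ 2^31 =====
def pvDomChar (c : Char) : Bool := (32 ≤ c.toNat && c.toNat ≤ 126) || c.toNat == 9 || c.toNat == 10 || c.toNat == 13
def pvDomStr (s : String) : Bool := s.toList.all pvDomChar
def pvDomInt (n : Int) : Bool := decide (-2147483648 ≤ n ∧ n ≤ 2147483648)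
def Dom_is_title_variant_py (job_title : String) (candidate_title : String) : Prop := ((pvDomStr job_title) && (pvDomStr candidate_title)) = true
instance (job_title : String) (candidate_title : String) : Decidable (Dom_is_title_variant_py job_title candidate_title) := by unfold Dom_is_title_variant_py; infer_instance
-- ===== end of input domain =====

-- B replaces A's loop over variant groups with an inverted index (title -> canonical key)
-- built once, so the check is two lookups and one comparison (objective: idiomatic).

-- ===== PORT A =====
def variantsA : List (String × List String) :=
  [("software engineer", ["software developer", "software engineer", "full stack developer"]),
   ("product manager", ["product manager", "product owner", "product lead"]),
   ("data scientist", ["data scientist", "data analyst", "machine learning engineer"])]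

def variantLoopA (job_title : String) (candidate_title : String) :
    List (String × List String) → Bool
  | [] => false
  | (_, variant_list) :: rest =>
      if variant_list.contains job_title && variant_list.contains candidate_title then true
      else variantLoopA job_title candidate_title rest

def is_title_variant_py (job_title : String) (candidate_title : String) : Bool :=
  variantLoopA job_title candidate_title variantsA

-- ===== PORT B =====
def variantsB : List (String × List String) :=
  [("software engineer", ["software developer", "software engineer", "full stack developer"]),
   ("product manager", ["product manager", "product owner", "product lead"]),
   ("data scientist", ["data scientist", "data analyst", "machine learning engineer"])]

-- the dict comprehension {title: canonical for canonical, titles in _VARIANTS.items() for title in titles}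
def titleIndex : PySem.Dict String String :=
  variantsB.foldl (fun d p => p.2.foldl (fun d t => d.insert t p.1) d) PySem.Dict.empty

def is_title_variant_py_alt (job_title : String) (candidate_title : String) : Bool :=
  titleIndex.contains job_title && titleIndex.contains candidate_title &&
    (titleIndex.get? job_title == titleIndex.get? candidate_title)

-- ===== PRECONDITION & SPEC =====
def Spec_is_title_variant_py (job_title : String) (candidate_title : String) (out : Bool) : Prop := out = is_title_variant_py_alt job_title candidate_title
instance (job_title : String) (candidate_title : String) (out : Bool) : Decidable (Spec_is_title_variant_py job_title candidate_title out) := by unfold Spec_is_title_variant_py; infer_instance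

-- ===== CLAIM (what is proved, stated in full; the proofs are below) =====
def Claim_equal_is_title_variant_py : Prop := ∀ (job_title : String) (candidate_title : String), Dom_is_title_variant_py job_title candidate_title → Spec_is_title_variant_py job_title candidate_title (is_title_variant_py job_title candidate_title)

-- ===== LEMMAS AND PROOFS =====

-- the index, evaluated once
theorem titleIndex_eq : titleIndex = PySem.Dict.mk
    [("software developer", "software engineer"), ("software engineer", "software engineer"),
     ("full stack developer", "software engineer"),
     ("product manager", "product manager"), ("product owner", "product manager"),
     ("product lead", "product manager"),
     ("data scientist", "data scientist"), ("data analyst", "data scientist"),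
     ("machine learning engineer", "data scientist")] := by decide

-- each group's membership test, expressed through the index
theorem mem_group1 (s : String) :
    (["software developer", "software engineer", "full stack developer"].contains s)
      = (titleIndex.get? s == some "software engineer") := by
  rw [titleIndex_eq]
  by_cases h1 : s = "software developer"; · subst h1; decide
  by_cases h2 : s = "software engineer"; · subst h2; decide
  by_cases h3 : s = "full stack developer"; · subst h3; decide
  by_cases h4 : s = "product manager"; · subst h4; decide
  by_cases h5 : s = "product owner"; · subst h5; decide
  by_cases h6 : s = "product lead"; · subst h6; decide
  by_cases h7 : s = "data scientist"; · subst h7; decide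
  by_cases h8 : s = "data analyst"; · subst h8; decide
  by_cases h9 : s = "machine learning engineer"; · subst h9; decide
  simp [PySem.Dict.get?_mk_cons, PySem.Dict.get?, h1, h2, h3, h4, h5, h6, h7, h8, h9,
    Ne.symm h1, Ne.symm h2, Ne.symm h3, Ne.symm h4, Ne.symm h5, Ne.symm h6,
    Ne.symm h7, Ne.symm h8, Ne.symm h9]

theorem mem_group2 (s : String) :
    (["product manager", "product owner", "product lead"].contains s)
      = (titleIndex.get? s == some "product manager") := by
  rw [titleIndex_eq]
  by_cases h1 : s = "software developer"; · subst h1; decide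
  by_cases h2 : s = "software engineer"; · subst h2; decide
  by_cases h3 : s = "full stack developer"; · subst h3; decide
  by_cases h4 : s = "product manager"; · subst h4; decide
  by_cases h5 : s = "product owner"; · subst h5; decide
  by_cases h6 : s = "product lead"; · subst h6; decide
  by_cases h7 : s = "data scientist"; · subst h7; decide
  by_cases h8 : s = "data analyst"; · subst h8; decide
  by_cases h9 : s = "machine learning engineer"; · subst h9; decide
  simp [PySem.Dict.get?_mk_cons, PySem.Dict.get?, h1, h2, h3, h4, h5, h6, h7, h8, h9,
    Ne.symm h1, Ne.symm h2, Ne.symm h3, Ne.symm h4, Ne.symm h5, Ne.symm h6,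
    Ne.symm h7, Ne.symm h8, Ne.symm h9]

theorem mem_group3 (s : String) :
    (["data scientist", "data analyst", "machine learning engineer"].contains s)
      = (titleIndex.get? s == some "data scientist") := by
  rw [titleIndex_eq]
  by_cases h1 : s = "software developer"; · subst h1; decide
  by_cases h2 : s = "software engineer"; · subst h2; decide
  by_cases h3 : s = "full stack developer"; · subst h3; decide
  by_cases h4 : s = "product manager"; · subst h4; decide
  by_cases h5 : s = "product owner"; · subst h5; decide
  by_cases h6 : s = "product lead"; · subst h6; decide
  by_cases h7 : s = "data scientist"; · subst h7; decide
  by_cases h8 : s = "data analyst"; · subst h8; decide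
  by_cases h9 : s = "machine learning engineer"; · subst h9; decide
  simp [PySem.Dict.get?_mk_cons, PySem.Dict.get?, h1, h2, h3, h4, h5, h6, h7, h8, h9,
    Ne.symm h1, Ne.symm h2, Ne.symm h3, Ne.symm h4, Ne.symm h5, Ne.symm h6,
    Ne.symm h7, Ne.symm h8, Ne.symm h9]

-- the index only ever returns one of the three canonical keys (or none)
theorem index_cases (s : String) :
    titleIndex.get? s = none ∨ titleIndex.get? s = some "software engineer" ∨
    titleIndex.get? s = some "product manager" ∨ titleIndex.get? s = some "data scientist" := by
  rw [titleIndex_eq]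
  by_cases h1 : s = "software developer"; · subst h1; decide
  by_cases h2 : s = "software engineer"; · subst h2; decide
  by_cases h3 : s = "full stack developer"; · subst h3; decide
  by_cases h4 : s = "product manager"; · subst h4; decide
  by_cases h5 : s = "product owner"; · subst h5; decide
  by_cases h6 : s = "product lead"; · subst h6; decide
  by_cases h7 : s = "data scientist"; · subst h7; decide
  by_cases h8 : s = "data analyst"; · subst h8; decide
  by_cases h9 : s = "machine learning engineer"; · subst h9; decide
  left
  simp [PySem.Dict.get?_mk_cons, PySem.Dict.get?, Ne.symm h1, Ne.symm h2, Ne.symm h3, Ne.symm h4,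
    Ne.symm h5, Ne.symm h6, Ne.symm h7, Ne.symm h8, Ne.symm h9]

theorem main_eq (j c : String) : is_title_variant_py j c = is_title_variant_py_alt j c := by
  have hj := index_cases j
  have hc := index_cases c
  unfold is_title_variant_py is_title_variant_py_alt
  simp only [variantsA, variantLoopA, mem_group1, mem_group2, mem_group3,
    PySem.Dict.contains_eq_isSome_get?]
  rcases hj with hj | hj | hj | hj <;> rcases hc with hc | hc | hc | hc <;>
    simp [hj, hc]

-- ===== VERDICT (by name: the statement is the Claim_ definition above) =====
theorem is_title_variant_py_spec : Claim_equal_is_title_variant_py := by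
  intro j c _
  unfold Spec_is_title_variant_py
  exact main_eq j c
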